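-- pv_equiv track=rewrite | github.com/csaument/python-dashboard | app.py | filter_by_party
-- ===== SOURCE A (Python) =====
-- def filter_by_party(party_value, data):
--     filtered_data = []
--     if party_value == 0:  # Democrat
--         filtered_data = [d for d in data if d['party'] == 'D']
--     elif party_value == 2:  # Republican
--         filtered_data = [d for d in data if d['party'] == 'R']
--     elif party_value == 3:  # Independent
--         filtered_data = [d for d in data if d['party'] == 'I']
--     else:  # All
--         filtered_data = data
--     return filtered_data
-- ===== SOURCE B (Python) =====
-- def filter_by_party(party_value, data):
--     target = {0: 'D', 2: 'R', 3: 'I'}.get(party_value)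
--     if target is None:  # All
--         return data
--     # build an index of records grouped by party, then pick the one bucket
--     buckets = {}
--     for d in data:
--         buckets.setdefault(d.get('party'), []).append(d)
--     return buckets.get(target, [])
-- ===== Notes on version B (the rewrite author's own statement) =====
-- stated objective: alternative
-- what changed: Instead of filtering with a per-code branch, B builds a dict of buckets grouping all records by their party in one pass and then returns the single bucket for the looked-up code (or data unchanged for the All/default case).
import Mathlib
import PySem

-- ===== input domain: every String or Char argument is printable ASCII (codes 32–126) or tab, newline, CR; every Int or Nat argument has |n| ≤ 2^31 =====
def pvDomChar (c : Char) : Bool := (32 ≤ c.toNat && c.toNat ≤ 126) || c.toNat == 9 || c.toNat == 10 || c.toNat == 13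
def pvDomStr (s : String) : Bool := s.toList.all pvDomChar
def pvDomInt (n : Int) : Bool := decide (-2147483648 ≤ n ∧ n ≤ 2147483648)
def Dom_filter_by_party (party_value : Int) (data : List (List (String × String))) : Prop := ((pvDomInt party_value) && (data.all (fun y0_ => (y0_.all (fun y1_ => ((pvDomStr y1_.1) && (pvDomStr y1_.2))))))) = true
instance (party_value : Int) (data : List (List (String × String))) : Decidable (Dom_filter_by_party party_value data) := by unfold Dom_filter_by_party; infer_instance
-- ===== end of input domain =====

-- B groups all records into per-party buckets in one pass and returns the looked-up bucket; objective: alternative.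

-- ===== PORT A =====
-- d['party'] is ported as (PySem.Dict.mk d).get? "party"; Pre_ excludes the inputs where Python raises KeyError.
def filter_by_party (party_value : Int) (data : List (List (String × String))) : List (List (String × String)) :=
  if party_value = 0 then
    data.filter (fun d => (PySem.Dict.mk d).get? "party" == some "D")
  else if party_value = 2 then
    data.filter (fun d => (PySem.Dict.mk d).get? "party" == some "R")
  else if party_value = 3 then
    data.filter (fun d => (PySem.Dict.mk d).get? "party" == some "I")
  else
    data

-- ===== PORT B =====
-- buckets.setdefault(k, []).append(d) is ported as Dict.modify k [] (· ++ [d]) — the same in-place 'd[k] = d.get(k, []) + [d]'.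
def filter_by_party_alt (party_value : Int) (data : List (List (String × String))) : List (List (String × String)) :=
  match (PySem.Dict.mk [((0:Int), "D"), (2, "R"), (3, "I")]).get? party_value with
  | none => data
  | some target =>
      let buckets : PySem.Dict (Option String) (List (List (String × String))) :=
        data.foldl (fun b d => b.modify ((PySem.Dict.mk d).get? "party") [] (· ++ [d])) PySem.Dict.empty
      buckets.getD (some target) []

-- ===== PRECONDITION & SPEC =====
-- Pre_ excludes exactly the inputs where A raises KeyError: a record without a 'party' key while party_value is 0, 2 or 3.
def Pre_filter_by_party (party_value : Int) (data : List (List (String × String))) : Prop :=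
  (party_value = 0 ∨ party_value = 2 ∨ party_value = 3) →
    ∀ d ∈ data, (PySem.Dict.mk d).contains "party" = true
instance (party_value : Int) (data : List (List (String × String))) : Decidable (Pre_filter_by_party party_value data) := by unfold Pre_filter_by_party; infer_instance

def pvWitness_filter_by_party : Int × (List (List (String × String))) :=
  (0, [[("party", "D"), ("name", "a")], [("party", "R")]])


def Spec_filter_by_party (party_value : Int) (data : List (List (String × String))) (out : List (List (String × String))) : Prop := out = filter_by_party_alt party_value data
instance (party_value : Int) (data : List (List (String × String))) (out : List (List (String × String))) : Decidable (Spec_filter_by_party party_value data out) := by unfold Spec_filter_by_party; infer_instance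

-- ===== CLAIM =====
def Claim_equal_filter_by_party : Prop := ∀ (party_value : Int) (data : List (List (String × String))), Dom_filter_by_party party_value data → Pre_filter_by_party party_value data → Spec_filter_by_party party_value data (filter_by_party party_value data)


-- ===== LEMMAS AND PROOFS =====

-- Invariant of B's grouping loop: the bucket of k collects, in order, exactly the records keyed k.
theorem bucket_getD (k : Option String) :
    ∀ (l : List (List (String × String))) (b : PySem.Dict (Option String) (List (List (String × String)))),
      (l.foldl (fun b d => b.modify ((PySem.Dict.mk d).get? "party") [] (· ++ [d])) b).getD k []
        = b.getD k [] ++ l.filter (fun d => (PySem.Dict.mk d).get? "party" == k) := by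
  intro l
  induction l with
  | nil => intro b; simp
  | cons x xs ih =>
      intro b
      simp only [List.foldl_cons, List.filter_cons, ih]
      rw [PySem.Dict.getD_modify]
      by_cases h : (PySem.Dict.mk x).get? "party" = k
      · simp [h, List.append_assoc]
      · simp [h, Ne.symm h]

theorem bucket_eq_filter (c : String) (data : List (List (String × String))) :
    (data.foldl (fun b d => b.modify ((PySem.Dict.mk d).get? "party") [] (· ++ [d]))
        PySem.Dict.empty).getD (some c) []
      = data.filter (fun d => (PySem.Dict.mk d).get? "party" == some c) := by
  rw [bucket_getD]
  simp

-- ===== VERDICT =====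
theorem filter_by_party_spec : Claim_equal_filter_by_party := by
  intro party_value data _ _
  unfold Spec_filter_by_party filter_by_party filter_by_party_alt
  by_cases h0 : party_value = 0
  · subst h0
    rw [show (PySem.Dict.mk [((0:Int), "D"), (2, "R"), (3, "I")]).get? 0 = some "D" from by decide]
    exact (bucket_eq_filter "D" data).symm
  · by_cases h2 : party_value = 2
    · subst h2
      simp only [if_neg h0]
      rw [show (PySem.Dict.mk [((0:Int), "D"), (2, "R"), (3, "I")]).get? 2 = some "R" from by decide]
      exact (bucket_eq_filter "R" data).symm
    · by_cases h3 : party_value = 3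
      · subst h3
        simp only [if_neg h0, if_neg h2]
        rw [show (PySem.Dict.mk [((0:Int), "D"), (2, "R"), (3, "I")]).get? 3 = some "I" from by decide]
        exact (bucket_eq_filter "I" data).symm
      · simp only [if_neg h0, if_neg h2, if_neg h3]
        have : (PySem.Dict.mk [((0:Int), "D"), (2, "R"), (3, "I")]).get? party_value = none := by
          simp [PySem.Dict.get?, Ne.symm h0, Ne.symm h2, Ne.symm h3]
        rw [this]
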